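-- pv_equiv track=rewrite | github.com/devgothwal/-forex-analyzer | backend/app/services/ml_pipeline.py | _get_trading_session
-- ===== SOURCE A (Python) =====
-- def _get_trading_session(hour: int) -> str:
--     """Determine trading session based on hour"""
--
--     sessions = {
--         'Sydney': {'start': 21, 'end': 6},
--         'Tokyo': {'start': 23, 'end': 8},
--         'London': {'start': 7, 'end': 16},
--         'New York': {'start': 12, 'end': 21}
--     }
--
--     for session, times in sessions.items():
--         start, end = times['start'], times['end']
--
--         if start > end:  # Session spans midnight
--             if hour >= start or hour < end:
--                 return session
--         else:  # Normal session
--             if start <= hour < end: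
--                 return session
--
--     return 'Other'
-- ===== SOURCE B (Python) =====
-- def _get_trading_session(hour: int) -> str:
--     """Determine trading session based on hour (resolved first-match timeline)."""
--     if hour < 6 or hour >= 21:
--         return 'Sydney'
--     elif hour < 8:
--         return 'Tokyo'
--     elif hour < 16:
--         return 'London'
--     else:
--         return 'New York'
-- ===== Notes on version B (the rewrite author's own statement) =====
-- stated objective: simpler
-- what changed: Replaces the dict of session start/end times and the midnight-wrap loop with a direct ordered if/elif chain on hour (the resolved first-match timeline); the unreachable 'Other' branch disappears.
import Mathlib
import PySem

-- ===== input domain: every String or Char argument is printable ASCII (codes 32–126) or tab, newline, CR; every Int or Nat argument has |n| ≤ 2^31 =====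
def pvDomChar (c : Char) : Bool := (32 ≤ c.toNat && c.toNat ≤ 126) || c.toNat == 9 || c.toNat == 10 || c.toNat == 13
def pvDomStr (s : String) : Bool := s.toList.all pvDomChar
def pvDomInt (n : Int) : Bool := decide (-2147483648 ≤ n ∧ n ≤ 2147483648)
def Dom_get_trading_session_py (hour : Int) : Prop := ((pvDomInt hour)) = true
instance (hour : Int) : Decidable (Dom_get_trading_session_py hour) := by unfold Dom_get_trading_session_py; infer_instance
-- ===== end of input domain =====

-- B replaces A's session dict + midnight-wrap loop with a direct ordered if/elif chain (simpler).

-- ===== PORT A =====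
-- the sessions dict, as an insertion-ordered association list name ↦ (start, end)
def pvSessions : List (String × (Int × Int)) :=
  [("Sydney", (21, 6)), ("Tokyo", (23, 8)), ("London", (7, 16)), ("New York", (12, 21))]

-- the for-loop over sessions.items(): first matching session, else 'Other'
def pvSessionLoop (hour : Int) : List (String × (Int × Int)) → String
  | [] => "Other"
  | (session, (start, «end»)) :: rest =>
    if start > «end» then
      if hour ≥ start ∨ hour < «end» then session else pvSessionLoop hour rest
    else
      if start ≤ hour ∧ hour < «end» then session else pvSessionLoop hour rest

def get_trading_session_py (hour : Int) : String := pvSessionLoop hour pvSessions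

-- ===== PORT B =====
def get_trading_session_py_alt (hour : Int) : String :=
  if hour < 6 ∨ hour ≥ 21 then "Sydney"
  else if hour < 8 then "Tokyo"
  else if hour < 16 then "London"
  else "New York"

-- ===== PRECONDITION & SPEC =====
def Spec_get_trading_session_py (hour : Int) (out : String) : Prop := out = get_trading_session_py_alt hour
instance (hour : Int) (out : String) : Decidable (Spec_get_trading_session_py hour out) := by unfold Spec_get_trading_session_py; infer_instance

-- ===== CLAIM (what is proved, stated in full; the proofs are below) =====
def Claim_equal_get_trading_session_py : Prop := ∀ (hour : Int), Dom_get_trading_session_py hour → Spec_get_trading_session_py hour (get_trading_session_py hour)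

-- ===== LEMMAS AND PROOFS =====

-- ===== VERDICT (by name: the statement is the Claim_ definition above) =====
theorem get_trading_session_py_spec : Claim_equal_get_trading_session_py := by
  intro hour _
  unfold Spec_get_trading_session_py get_trading_session_py get_trading_session_py_alt pvSessions
  rw [pvSessionLoop, pvSessionLoop, pvSessionLoop, pvSessionLoop]
  norm_num
  split_ifs <;> first | rfl | omega
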